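-- pv_equiv track=rewrite | github.com/shivanshv45/Orbit | backend/services/manual_parsing.py | merge_small_modules
-- ===== SOURCE A (Python) =====
-- MAX_SUBTOPICS_PER_MODULE = 6
--
-- MIN_SUBTOPICS_PER_MODULE = 2
--
-- def merge_small_modules(modules: list[list[dict]]) -> list[list[dict]]:
--     if len(modules) <= 1:
--         return modules
--
--     merged = []
--     i = 0
--
--     while i < len(modules):
--         current = modules[i][:]
--
--         while i + 1 < len(modules) and len(current) < MIN_SUBTOPICS_PER_MODULE:
--             next_module = modules[i + 1]
--             if len(current) + len(next_module) <= MAX_SUBTOPICS_PER_MODULE: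
--                 current.extend(next_module)
--                 i += 1
--             else:
--                 break
--
--         merged.append(current)
--         i += 1
--
--     return merged
-- ===== SOURCE B (Python) =====
-- MAX_SUBTOPICS_PER_MODULE = 6
--
-- MIN_SUBTOPICS_PER_MODULE = 2
--
-- def merge_small_modules(modules: list[list[dict]]) -> list[list[dict]]:
--     if len(modules) <= 1:
--         return modules
--     result = []
--     for module in modules:
--         if (result
--                 and len(result[-1]) < MIN_SUBTOPICS_PER_MODULE
--                 and len(result[-1]) + len(module) <= MAX_SUBTOPICS_PER_MODULE):
--             result[-1].extend(module)
--         else: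
--             result.append(module[:])
--     return result
-- ===== Notes on version B (the rewrite author's own statement) =====
-- stated objective: simpler
-- what changed: Replaced the index-driven outer while loop with an inner lookahead while loop by a single for-loop over the modules that either extends the last emitted group (when it is still small and the merge fits) or starts a new group.
import Mathlib
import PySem

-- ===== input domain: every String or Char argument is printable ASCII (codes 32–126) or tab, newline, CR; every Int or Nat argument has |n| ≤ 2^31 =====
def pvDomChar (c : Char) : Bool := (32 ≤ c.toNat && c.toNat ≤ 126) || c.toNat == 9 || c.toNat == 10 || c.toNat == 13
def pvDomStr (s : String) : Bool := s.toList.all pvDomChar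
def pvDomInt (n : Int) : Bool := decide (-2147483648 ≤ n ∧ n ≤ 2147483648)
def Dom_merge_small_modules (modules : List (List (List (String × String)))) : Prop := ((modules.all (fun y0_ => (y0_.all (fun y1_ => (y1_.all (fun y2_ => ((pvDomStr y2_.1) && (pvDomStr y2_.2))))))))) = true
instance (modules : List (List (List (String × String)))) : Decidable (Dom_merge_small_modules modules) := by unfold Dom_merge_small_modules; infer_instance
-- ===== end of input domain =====

-- B replaces A's index-driven while loop with an inner lookahead loop by a single pass
-- that grows the last emitted group (objective: simpler; same return value).

-- ===== PORT A =====
def pvMAX : Nat := 6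
def pvMIN : Nat := 2

-- inner while loop of A: `current` is the group being built, `rest` the modules after index i;
-- returns the final current and the not-yet-consumed suffix (i.e. the final i, as a suffix)
def pvInnerA (current : List (List (String × String))) :
    List (List (List (String × String))) →
      List (List (String × String)) × List (List (List (String × String)))
  | [] => (current, [])
  | next_module :: rest =>
    if current.length < pvMIN then
      if current.length + next_module.length ≤ pvMAX then
        pvInnerA (current ++ next_module) rest
      else (current, next_module :: rest)
    else (current, next_module :: rest)

-- outer while loop of A; fuel = the initial number of modules bounds the iteration count
def pvOuterA : Nat → List (List (List (String × String))) →
    List (List (List (String × String))) → List (List (List (String × String)))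
  | _, merged, [] => merged
  | 0, merged, _ :: _ => merged
  | fuel + 1, merged, m :: rest =>
    let p := pvInnerA m rest
    pvOuterA fuel (merged ++ [p.1]) p.2

def merge_small_modules (modules : List (List (List (String × String)))) : List (List (List (String × String))) :=
  if modules.length ≤ 1 then modules
  else pvOuterA modules.length [] modules

-- ===== PORT B =====
-- B's loop body; the accumulator is kept in reverse (result[-1] is the head), reversed at the end
def pvStepB (racc : List (List (List (String × String)))) (module : List (List (String × String))) :
    List (List (List (String × String))) :=
  match racc with
  | [] => [module]
  | g :: rest =>
    if g.length < pvMIN ∧ g.length + module.length ≤ pvMAX then (g ++ module) :: rest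
    else module :: g :: rest

def merge_small_modules_alt (modules : List (List (List (String × String)))) : List (List (List (String × String))) :=
  if modules.length ≤ 1 then modules
  else (modules.foldl pvStepB []).reverse

-- ===== PRECONDITION & SPEC =====
def Spec_merge_small_modules (modules : List (List (List (String × String)))) (out : List (List (List (String × String)))) : Prop := out = merge_small_modules_alt modules
instance (modules : List (List (List (String × String)))) (out : List (List (List (String × String)))) : Decidable (Spec_merge_small_modules modules out) := by unfold Spec_merge_small_modules; infer_instance

-- ===== CLAIM (what is proved, stated in full; the proofs are below) =====
def Claim_equal_merge_small_modules : Prop := ∀ (modules : List (List (List (String × String)))), Dom_merge_small_modules modules → Spec_merge_small_modules modules (merge_small_modules modules)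

-- ===== LEMMAS AND PROOFS =====
-- common greedy specification: goSpec cur rest = groups produced from pending group cur and remaining modules rest
def pvGo (cur : List (List (String × String))) :
    List (List (List (String × String))) → List (List (List (String × String)))
  | [] => [cur]
  | n :: rest =>
    if cur.length < pvMIN ∧ cur.length + n.length ≤ pvMAX then pvGo (cur ++ n) rest
    else cur :: pvGo n rest

theorem pvA_key (rest : List (List (List (String × String)))) :
    ∀ (fuel : Nat) (cur : List (List (String × String)))
      (merged : List (List (List (String × String)))), rest.length ≤ fuel →
      pvOuterA fuel (merged ++ [(pvInnerA cur rest).1]) (pvInnerA cur rest).2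
        = merged ++ pvGo cur rest := by
  induction rest with
  | nil => intro fuel cur merged _; simp [pvInnerA, pvGo, pvOuterA]
  | cons n rest ih =>
    intro fuel cur merged hf
    by_cases hc : cur.length < pvMIN ∧ cur.length + n.length ≤ pvMAX
    · rw [show pvInnerA cur (n :: rest) = pvInnerA (cur ++ n) rest from by
        simp [pvInnerA, hc.1, hc.2]]
      rw [ih fuel (cur ++ n) merged (by simp at hf; omega)]
      simp [pvGo, hc]
    · have hin : pvInnerA cur (n :: rest) = (cur, n :: rest) := by
        by_cases h1 : cur.length < pvMIN
        · have h2 : ¬ cur.length + n.length ≤ pvMAX := fun hh => hc ⟨h1, hh⟩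
          simp [pvInnerA, h1, h2]
        · simp [pvInnerA, h1]
      rw [hin]
      obtain ⟨f, rfl⟩ : ∃ f, fuel = f + 1 := ⟨fuel - 1, by simp at hf; omega⟩
      show pvOuterA (f + 1) (merged ++ [cur]) (n :: rest) = _
      rw [pvOuterA, ih f n (merged ++ [cur]) (by simp at hf; omega)]
      simp [pvGo, hc]

theorem pvB_key (rest : List (List (List (String × String))))
    (cur : List (List (String × String))) (racc : List (List (List (String × String)))) :
    (List.foldl pvStepB (cur :: racc) rest).reverse = racc.reverse ++ pvGo cur rest := by
  induction rest generalizing cur racc with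
  | nil => simp [pvGo]
  | cons n rest ih =>
    simp only [List.foldl_cons, pvStepB, pvGo]
    by_cases hc : cur.length < pvMIN ∧ cur.length + n.length ≤ pvMAX
    · rw [if_pos hc, if_pos hc, ih]
    · rw [if_neg hc, if_neg hc, ih (racc := cur :: racc)]
      simp

-- ===== VERDICT (by name: the statement is the Claim_ definition above) =====
theorem merge_small_modules_spec : Claim_equal_merge_small_modules := by
  intro modules _
  unfold Spec_merge_small_modules
  match modules with
  | [] => rfl
  | [m] => rfl
  | a :: b :: t =>
    have hlen : ¬ (a :: b :: t : List (List (List (String × String)))).length ≤ 1 := by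
      simp
    unfold merge_small_modules merge_small_modules_alt
    rw [if_neg hlen, if_neg hlen]
    have hA : pvOuterA (a :: b :: t).length [] (a :: b :: t) = pvGo a (b :: t) := by
      have hl : (a :: b :: t : List (List (List (String × String)))).length = t.length + 2 := by
        simp
      rw [hl, pvOuterA]
      have := pvA_key (b :: t) (t.length + 1) a [] (by simp)
      simpa using this
    have hB : ((a :: b :: t).foldl pvStepB []).reverse = pvGo a (b :: t) := by
      have : List.foldl pvStepB ([] : List (List (List (String × String)))) (a :: b :: t)
          = List.foldl pvStepB [a] (b :: t) := by simp [pvStepB]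
      rw [this]
      simpa using pvB_key (b :: t) a []
    rw [hA, hB]
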